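-- pv_equiv track=rewrite | github.com/selfreferencing/erdos-86-lean | Zeroless/exp58_zero_mechanism.py | find_unprotected_5_detailed
-- ===== SOURCE A (Python) =====
-- def get_digits_lsb_first(n_val):
--     """Get decimal digits as list (LSB first)."""
--     s = str(2 ** n_val)
--     return [int(d) for d in reversed(s)]
--
-- def find_unprotected_5_detailed(n):
--     """
--     Find all positions where digit 5 has carry-in 0.
--     Carry-in at position i depends on all digits to the right (positions 0..i-1).
--     """
--     digits = get_digits_lsb_first(n)
--     unprotected = []
--
--     carry = 0
--     for i, d in enumerate(digits):
--         if d == 5 and carry == 0: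
--             unprotected.append(i)
--         val = 2 * d + carry
--         carry = val // 10
--
--     return unprotected
-- ===== SOURCE B (Python) =====
-- def get_digits_lsb_first(n_val):
--     """Get decimal digits as list (LSB first)."""
--     s = str(2 ** n_val)
--     return [int(d) for d in reversed(s)]
--
-- def find_unprotected_5_detailed(n):
--     """Positions i with digits[i]==5 and doubling carry-in 0: carry-in at i is 1
--     exactly when the previous digit is >= 5, so pair each digit with its
--     predecessor (sentinel 0 at position 0) instead of simulating the carry."""
--     digits = get_digits_lsb_first(n)
--     return [i for i, (d, prev) in enumerate(zip(digits, [0] + digits)) if d == 5 and prev < 5]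
-- ===== Notes on version B (the rewrite author's own statement) =====
-- stated objective: simpler
-- what changed: A simulates the doubling carry with a running accumulator across the whole digit list; B drops the carry variable entirely and selects positions by a local neighbour test (digit == 5 and previous digit < 5, position 0 paired with sentinel 0), since the doubling carry-in at position i is 1 exactly when digits[i-1] >= 5.
import Mathlib
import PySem

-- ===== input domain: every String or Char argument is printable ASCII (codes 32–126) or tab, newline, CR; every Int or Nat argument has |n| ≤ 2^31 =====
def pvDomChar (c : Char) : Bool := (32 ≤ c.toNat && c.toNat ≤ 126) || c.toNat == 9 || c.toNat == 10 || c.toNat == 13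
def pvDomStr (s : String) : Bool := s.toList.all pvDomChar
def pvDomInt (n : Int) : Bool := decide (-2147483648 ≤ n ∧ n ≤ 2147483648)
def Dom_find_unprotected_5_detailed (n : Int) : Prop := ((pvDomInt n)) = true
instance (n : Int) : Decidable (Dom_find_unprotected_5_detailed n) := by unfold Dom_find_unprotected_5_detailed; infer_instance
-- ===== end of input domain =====

-- B replaces A's carry simulation by a local neighbour test (carry-in at i is 1 iff digits[i-1] >= 5); objective: simpler.

-- ===== PORT A =====
-- get_digits_lsb_first: str(2**n) reversed, each char via int(d).
-- int(d) is ported as the char code minus 48: exact for the digit characters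
-- str(2**n) yields when n ≥ 0 (Pre_); 2**n is 2 ^ n.toNat for n ≥ 0.
def pvDigitsLsb (n : Int) : List Int :=
  (PySem.Int.toChars ((2 : Int) ^ n.toNat)).reverse.map (fun c => (c.toNat : Int) - 48)

-- enumerate(xs) starting at s: same list PySem.List.enumerate builds (proved in
-- pvEnum_eq below), written with the tail-safe zipIdx/map so it evaluates on long inputs
def pvEnum {α : Type} (xs : List α) (s : Int) : List (Int × α) :=
  (xs.zipIdx 0).map (fun p => (s + (p.2 : Int), p.1))

-- the body of A's for-loop, one step on the state (unprotected, carry)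
def pvStepA (st : List Int × Int) (p : Int × Int) : List Int × Int :=
  (if p.2 = 5 ∧ st.2 = 0 then st.1 ++ [p.1] else st.1,
   PySem.Int.floordiv (2 * p.2 + st.2) 10)

def find_unprotected_5_detailed (n : Int) : List Int :=
  let digits := pvDigitsLsb n
  ((pvEnum digits 0).foldl pvStepA ([], 0)).1

-- ===== PORT B =====
-- the comprehension's filter: d == 5 and prev < 5
def pvSelB (p : Int × (Int × Int)) : Option Int :=
  if p.2.1 = 5 ∧ p.2.2 < 5 then some p.1 else none

def find_unprotected_5_detailed_alt (n : Int) : List Int :=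
  let digits := pvDigitsLsb n
  (pvEnum (digits.zip (0 :: digits)) 0).filterMap pvSelB

-- ===== PRECONDITION & SPEC =====
-- For n < 0 Python's 2**n is a float, so int(d) hits '.' and both A and B raise ValueError.
def Pre_find_unprotected_5_detailed (n : Int) : Prop := 0 ≤ n
instance (n : Int) : Decidable (Pre_find_unprotected_5_detailed n) := by unfold Pre_find_unprotected_5_detailed; infer_instance
def pvWitness_find_unprotected_5_detailed : Int := (7)
def Spec_find_unprotected_5_detailed (n : Int) (out : List Int) : Prop := out = find_unprotected_5_detailed_alt n
instance (n : Int) (out : List Int) : Decidable (Spec_find_unprotected_5_detailed n out) := by unfold Spec_find_unprotected_5_detailed; infer_instance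

-- ===== CLAIM (what is proved, stated in full; the proofs are below) =====
def Claim_equal_find_unprotected_5_detailed : Prop := ∀ (n : Int), Dom_find_unprotected_5_detailed n → Pre_find_unprotected_5_detailed n → Spec_find_unprotected_5_detailed n (find_unprotected_5_detailed n)

-- ===== LEMMAS AND PROOFS =====

-- doubling carry: for a decimal digit d and carry c ∈ {0,1}, (2d+c)//10 = [5 ≤ d]
lemma pvCarry_eq (d c : Int) (h0 : 0 ≤ d) (h9 : d ≤ 9) (hc : c = 0 ∨ c = 1) :
    PySem.Int.floordiv (2 * d + c) 10 = if 5 ≤ d then 1 else 0 := by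
  rw [PySem.Int.floordiv_eq_ediv_of_pos (by norm_num)]
  split_ifs with h <;> omega

lemma pvDigitChar_range (m : Nat) (h : m < 10) :
    48 ≤ (Nat.digitChar m).toNat ∧ (Nat.digitChar m).toNat ≤ 57 := by
  interval_cases m <;> decide

lemma pvToDigitsCore_range : ∀ (fuel n : Nat) (ds : List Char),
    (∀ c ∈ ds, 48 ≤ c.toNat ∧ c.toNat ≤ 57) →
    ∀ c ∈ Nat.toDigitsCore 10 fuel n ds, 48 ≤ c.toNat ∧ c.toNat ≤ 57 := by
  intro fuel
  induction fuel with
  | zero => intro n ds h; simpa [Nat.toDigitsCore] using h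
  | succ f ih =>
    intro n ds h c hc
    have hds' : ∀ c ∈ (n % 10).digitChar :: ds, 48 ≤ c.toNat ∧ c.toNat ≤ 57 := by
      intro c' hc'
      rcases List.mem_cons.mp hc' with rfl | hmem
      · exact pvDigitChar_range _ (Nat.mod_lt _ (by norm_num))
      · exact h _ hmem
    rw [Nat.toDigitsCore] at hc
    by_cases hz : n / 10 = 0
    · rw [if_pos hz] at hc; exact hds' _ hc
    · rw [if_neg hz] at hc; exact ih _ _ hds' _ hc

lemma pvDigitsLsb_range (n : Int) : ∀ d ∈ pvDigitsLsb n, 0 ≤ d ∧ d ≤ 9 := by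
  intro d hd
  unfold pvDigitsLsb at hd
  rcases List.mem_map.mp hd with ⟨c, hc, rfl⟩
  have hc' : c ∈ PySem.Int.toChars ((2 : Int) ^ n.toNat) := List.mem_reverse.mp hc
  have hpos : ¬ ((2 : Int) ^ n.toNat < 0) := not_lt.mpr (by positivity)
  rw [PySem.Int.toChars, if_neg hpos] at hc'
  have := pvToDigitsCore_range _ _ [] (by intro c h; simp at h) c hc'
  omega

lemma pvEnum_zipIdx {α : Type} (xs : List α) : ∀ (k : Nat) (s : Int),
    (xs.zipIdx k).map (fun p => (s + (p.2 : Int), p.1)) = PySem.List.enumerate xs (s + k) := by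
  induction xs with
  | nil => intro k s; simp [PySem.List.enumerate_nil]
  | cons x tl ih =>
    intro k s
    rw [List.zipIdx_cons, List.map_cons, PySem.List.enumerate_cons, ih (k + 1) s]
    push_cast
    ring_nf

lemma pvEnum_eq {α : Type} (xs : List α) (s : Int) : pvEnum xs s = PySem.List.enumerate xs s := by
  simpa using pvEnum_zipIdx xs 0 s

lemma pvEnum_nil {α : Type} (s : Int) : pvEnum ([] : List α) s = [] := by
  simp [pvEnum_eq, PySem.List.enumerate_nil]

lemma pvEnum_cons {α : Type} (x : α) (xs : List α) (s : Int) :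
    pvEnum (x :: xs) s = (s, x) :: pvEnum xs (s + 1) := by
  simp [pvEnum_eq, PySem.List.enumerate_cons]

-- A's fold with carry-in [5 ≤ prev] equals B's neighbour filter, for any digit list
lemma pvLoop_eq (ds : List Int) : ∀ (s : Int) (acc : List Int) (prev : Int),
    (∀ d ∈ ds, 0 ≤ d ∧ d ≤ 9) →
    ((pvEnum ds s).foldl pvStepA (acc, if 5 ≤ prev then 1 else 0)).1
      = acc ++ (pvEnum (ds.zip (prev :: ds)) s).filterMap pvSelB := by
  induction ds with
  | nil => intro s acc prev _; simp [pvEnum_nil]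
  | cons d tl ih =>
    intro s acc prev hds
    have hd : 0 ≤ d ∧ d ≤ 9 := hds d (List.mem_cons_self ..)
    have htl : ∀ x ∈ tl, 0 ≤ x ∧ x ≤ 9 := fun x hx => hds x (List.mem_cons_of_mem _ hx)
    have hcarry : PySem.Int.floordiv (2 * d + (if 5 ≤ prev then 1 else 0)) 10
        = if 5 ≤ d then 1 else 0 :=
      pvCarry_eq d _ hd.1 hd.2 (by split_ifs <;> simp)
    rw [List.zip_cons_cons, pvEnum_cons, pvEnum_cons, List.foldl_cons, List.filterMap_cons]
    have hstep : pvStepA (acc, if 5 ≤ prev then 1 else 0) (s, d)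
        = ((if d = 5 ∧ ¬ 5 ≤ prev then acc ++ [s] else acc), if 5 ≤ d then 1 else 0) := by
      rw [pvStepA, hcarry]
      by_cases hp : 5 ≤ prev <;> by_cases h5 : d = 5 <;> simp [hp, h5]
    rw [hstep, ih (s + 1) _ d htl]
    by_cases hp : 5 ≤ prev
    · have hp' : ¬ prev < 5 := not_lt.mpr hp
      by_cases h5 : d = 5 <;> simp [pvSelB, hp, hp', h5]
    · have hp' : prev < 5 := not_le.mp hp
      by_cases h5 : d = 5 <;> simp [pvSelB, hp, hp', h5, List.append_assoc]

-- ===== VERDICT (by name: the statement is the Claim_ definition above) =====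
theorem find_unprotected_5_detailed_spec : Claim_equal_find_unprotected_5_detailed := by
  intro n _ _
  unfold Spec_find_unprotected_5_detailed find_unprotected_5_detailed find_unprotected_5_detailed_alt
  have := pvLoop_eq (pvDigitsLsb n) 0 [] 0 (pvDigitsLsb_range n)
  simpa using this
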